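-- pv_equiv track=rewrite | github.com/microncomputer/codingthematrix | Tools/usefulMethods.py | vector_sum_subset
-- ===== SOURCE A (Python) =====
-- def vector_sum_subset(sumVector, vectorSet):
--     # a function used within this function:
--     # sum GF2 vector lists and return true if they equal another vector sumvec
--     def sumvec(sumVec, vectorlist):
--         s = [sum(vectorlist[i][j] for i in range(len(vectorlist))) for j in range(len(vectorlist[0]))]
--         if s == sumVec:
--             return True
--         else:
--             return False
--
--     """
--     there will be 2^n subsets of a set, where n is the number of elements in the set (or lists in this case)
--     I will always admit when I did not do my own work and this is a moment where I
--     must admit I found the next algorithm for making a powerset on stack exchange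
--     in a moment of low energy and escapism. hey, we all do it.
--     the part I did not understand was the "if i&1<<k" which I assumed was some kind of bit shifting
--     so I will try to explain it for my own understanding here.
--     order of precedence favors << so that will happen first..
--     1<<k means 1 * 2^k since 00000001 will be shifted to the left k places. each place is 2^(place)
--     so i&1<<k means i&(2^k)
--     i&1<<k will be true if there's a 1 in the k place in the binary representation of i
--
--     so the subsets comprehension does:
--     for each new entry that will be added to subsets, it can be up to len(vectorset) elements(lists) in the new entry.
--     it adds the empty set only once because i&1<<k will only be false for all k's in the range when i is 0. otherwise,
--     at least one true will happen. this is bc when i >0, there's going to be a 1 in at least one of the bits making up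
--     the binary representation of i. since k will cover each bit in the length of binary needed for all i's EVERy time
--     then there has to be at least one true i&1<<k for each i > 0
--
--     ok, so i will go from 0 through 2^(len(vectorset))-1
--     and at each i, k will go from 0 through len(vectorset)-1
--     so 2^len * len operations
--     """
--
--     powerset = [[vectorSet[k] for k in range(len(vectorSet)) if i & 1 << k] for i in range(2 ** (len(vectorSet)))]
--     powerset.remove([])
--     # return powerset
--     return [powerset[i] for i in range(len(powerset)) if sumvec(sumVector, powerset[i])]
-- ===== SOURCE B (Python) =====
-- def vector_sum_subset(sumVector, vectorSet):
--     # Build the powerset by doubling: after processing the first k vectors,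
--     # `subsets` holds all subsets of them in bitmask-ascending order.
--     subsets = [[]]
--     for v in vectorSet:
--         subsets += [s + [v] for s in subsets]
--     subsets.remove([])
--     result = []
--     for subset in subsets:
--         s = [sum(vec[j] for vec in subset) for j in range(len(subset[0]))]
--         if s == sumVector:
--             result.append(subset)
--     return result
-- ===== Notes on version B (the rewrite author's own statement) =====
-- stated objective: alternative
-- what changed: B builds the powerset by incremental doubling (subsets += [s+[v] for s in subsets]) instead of A's bitmask double loop with i&1<<k tests and repeated indexing, and sums each subset by iterating its vectors directly instead of A's index-based sumvec helper.
import Mathlib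
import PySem

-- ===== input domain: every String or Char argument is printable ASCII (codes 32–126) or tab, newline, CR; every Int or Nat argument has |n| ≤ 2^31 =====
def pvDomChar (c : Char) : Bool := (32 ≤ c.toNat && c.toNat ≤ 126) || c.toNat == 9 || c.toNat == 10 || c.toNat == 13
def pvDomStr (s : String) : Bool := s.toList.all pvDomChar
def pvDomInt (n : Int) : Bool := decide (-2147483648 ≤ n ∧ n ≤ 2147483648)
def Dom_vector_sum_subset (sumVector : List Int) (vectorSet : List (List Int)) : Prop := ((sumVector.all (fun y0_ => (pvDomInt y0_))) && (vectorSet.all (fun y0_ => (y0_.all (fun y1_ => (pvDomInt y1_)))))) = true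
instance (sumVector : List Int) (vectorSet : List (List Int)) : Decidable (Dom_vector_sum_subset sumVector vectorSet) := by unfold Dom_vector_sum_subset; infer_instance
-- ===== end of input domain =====

-- B replaces A's bitmask double loop (i & 1 << k over all i, k) by incremental powerset
-- doubling and sums each subset by iterating its vectors instead of double indexing;
-- same enumeration order and result.

-- ===== PORT A =====
-- inner helper sumvec of A: s = [sum(vectorlist[i][j] for i in range(len(vectorlist)))
--                                for j in range(len(vectorlist[0]))]; s == sumVec
def pvSumvec (sumVec : List Int) (vectorlist : List (List Int)) : Bool :=
  let s : List Int :=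
    (List.range (PySem.List.pyGetD vectorlist (0 : Int) []).length).map (fun (j : Nat) =>
      ((List.range vectorlist.length).map (fun (i : Nat) =>
        PySem.List.pyGetD (PySem.List.pyGetD vectorlist ((i : Int)) []) ((j : Int)) 0)).sum)
  if s = sumVec then true else false

def vector_sum_subset (sumVector : List Int) (vectorSet : List (List Int)) : List (List (List Int)) :=
  let powerset : List (List (List Int)) :=
    (List.range (2 ^ vectorSet.length)).map (fun (i : Nat) =>
      ((List.range vectorSet.length).filter (fun (k : Nat) => i &&& (1 <<< k) != 0)).map
        (fun (k : Nat) => PySem.List.pyGetD vectorSet ((k : Int)) []))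
  let powerset := (PySem.List.remove? powerset []).getD []   -- powerset.remove([]); [] is always present (i = 0)
  ((List.range powerset.length).filter (fun (i : Nat) =>
      pvSumvec sumVector (PySem.List.pyGetD powerset ((i : Int)) []))).map
    (fun (i : Nat) => PySem.List.pyGetD powerset ((i : Int)) [])

-- ===== PORT B =====
def vector_sum_subset_alt (sumVector : List Int) (vectorSet : List (List Int)) : List (List (List Int)) :=
  let subsets : List (List (List Int)) :=
    vectorSet.foldl (fun subsets v => subsets ++ subsets.map (fun s => s ++ [v])) [[]]
  let subsets := (PySem.List.remove? subsets []).getD []     -- subsets.remove([]); [] is always first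
  subsets.foldl (fun result subset =>
    if (List.range (PySem.List.pyGetD subset (0 : Int) []).length).map (fun (j : Nat) =>
        subset.foldl (fun acc vec => acc + PySem.List.pyGetD vec ((j : Int)) 0) 0) = sumVector
    then result ++ [subset] else result) []

-- ===== PRECONDITION & SPEC =====
-- Pre_ excludes exactly the inputs on which Python A raises IndexError (both A and B index
-- each subset's vectors up to the length of the subset's FIRST vector, so they raise exactly
-- when some vector is shorter than an earlier one): vector lengths must be non-decreasing.
def Pre_vector_sum_subset (sumVector : List Int) (vectorSet : List (List Int)) : Prop :=
  List.Pairwise (· ≤ ·) (vectorSet.map List.length)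
instance (sumVector : List Int) (vectorSet : List (List Int)) : Decidable (Pre_vector_sum_subset sumVector vectorSet) := by unfold Pre_vector_sum_subset; infer_instance
def pvWitness_vector_sum_subset : List Int × List (List Int) := ([1, 1], [[1, 0], [0, 1], [1, 1]])

def Spec_vector_sum_subset (sumVector : List Int) (vectorSet : List (List Int)) (out : List (List (List Int))) : Prop := out = vector_sum_subset_alt sumVector vectorSet
instance (sumVector : List Int) (vectorSet : List (List Int)) (out : List (List (List Int))) : Decidable (Spec_vector_sum_subset sumVector vectorSet out) := by unfold Spec_vector_sum_subset; infer_instance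

-- ===== CLAIM (what is proved, stated in full; the proofs are below) =====
def Claim_equal_vector_sum_subset : Prop := ∀ (sumVector : List Int) (vectorSet : List (List Int)), Dom_vector_sum_subset sumVector vectorSet → Pre_vector_sum_subset sumVector vectorSet → Spec_vector_sum_subset sumVector vectorSet (vector_sum_subset sumVector vectorSet)

-- ===== LEMMAS AND PROOFS =====

-- the bit test `i & 1 << k != 0` is Nat.testBit
theorem pvBit_eq (i k : Nat) : (i &&& (1 <<< k) != 0) = i.testBit k := by
  rw [Nat.one_shiftLeft, Nat.and_two_pow]
  cases h : i.testBit k <;> simp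

-- indexing a list over range of its length is the list itself (getD form, any default)
theorem pvMapIndex_eq {α β : Type} (f : α → β) (l : List α) (d : α) :
    (List.range l.length).map (fun i => f (l.getD i d)) = l.map f := by
  induction l using List.reverseRecOn with
  | nil => simp
  | append_singleton l x ih =>
    rw [List.length_append, List.length_singleton, List.range_succ, List.map_append,
      List.map_append, ← ih]
    congr 1
    · exact List.map_congr_left (fun i hi => by
        rw [List.getD_append _ _ _ _ (List.mem_range.mp hi)])
    · simp [List.getD_eq_getElem?_getD]

-- A's bitmask subset of index i (getD form)
def pvSub (vs : List (List Int)) (i : Nat) : List (List Int) :=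
  ((List.range vs.length).filter (fun k => i.testBit k)).map (fun k => vs.getD k [])

-- A's bitmask powerset equals B's doubling powerset, in the same order
theorem pvPowerset_eq (vs : List (List Int)) :
    (List.range (2 ^ vs.length)).map (pvSub vs) =
      vs.foldl (fun subsets v => subsets ++ subsets.map (fun s => s ++ [v])) [[]] := by
  induction vs using List.reverseRecOn with
  | nil => simp [pvSub]
  | append_singleton vs x ih =>
    rw [List.foldl_concat, ← ih]
    have hn : (vs ++ [x]).length = vs.length + 1 := by simp
    have hsub_lo : ∀ i : Nat, i < 2 ^ vs.length → pvSub (vs ++ [x]) i = pvSub vs i := by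
      intro i hi
      unfold pvSub
      rw [hn, List.range_succ, List.filter_append]
      have : (List.filter (fun k => i.testBit k) [vs.length]) = [] := by
        simp [List.filter, Nat.testBit_lt_two_pow hi]
      rw [this, List.append_nil]
      apply List.map_congr_left
      intro k hk
      simp only [List.mem_filter, List.mem_range] at hk
      exact List.getD_append _ _ _ _ hk.1
    have hsub_hi : ∀ i : Nat, i < 2 ^ vs.length →
        pvSub (vs ++ [x]) (2 ^ vs.length + i) = pvSub vs i ++ [x] := by
      intro i hi
      unfold pvSub
      rw [hn, List.range_succ, List.filter_append]
      have h1 : (List.filter (fun k => (2 ^ vs.length + i).testBit k) [vs.length]) = [vs.length] := by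
        simp [List.filter, Nat.testBit_two_pow_add_eq, Nat.testBit_lt_two_pow hi]
      have h2 : List.filter (fun k => (2 ^ vs.length + i).testBit k) (List.range vs.length)
          = List.filter (fun k => i.testBit k) (List.range vs.length) := by
        apply List.filter_congr
        intro k hk
        simp only [List.mem_range] at hk
        rw [Nat.testBit_two_pow_add_gt hk]
      rw [h1, h2, List.map_append]
      congr 1
      · apply List.map_congr_left
        intro k hk
        simp only [List.mem_filter, List.mem_range] at hk
        exact List.getD_append _ _ _ _ hk.1
      · simp
    calc (List.range (2 ^ (vs ++ [x]).length)).map (pvSub (vs ++ [x]))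
        = (List.range (2 ^ vs.length + 2 ^ vs.length)).map (pvSub (vs ++ [x])) := by
          rw [hn, pow_succ, Nat.mul_two]
      _ = (List.range (2 ^ vs.length)).map (pvSub (vs ++ [x]))
            ++ (List.range (2 ^ vs.length)).map (fun i => pvSub (vs ++ [x]) (2 ^ vs.length + i)) := by
          rw [List.range_add, List.map_append, List.map_map]; rfl
      _ = (List.range (2 ^ vs.length)).map (pvSub vs)
            ++ ((List.range (2 ^ vs.length)).map (pvSub vs)).map (fun s => s ++ [x]) := by
          congr 1
          · exact List.map_congr_left (fun i hi => hsub_lo i (List.mem_range.mp hi))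
          · rw [List.map_map]
            exact List.map_congr_left (fun i hi => hsub_hi i (List.mem_range.mp hi))

-- index-based filter-comprehension over a list equals filtering the list
theorem pvIndexFilter_eq {α : Type} (p : α → Bool) (l : List α) (d : α) :
    ((List.range l.length).filter (fun i => p (l.getD i d))).map (fun i => l.getD i d) =
      l.filter p := by
  induction l using List.reverseRecOn with
  | nil => simp
  | append_singleton l x ih =>
    have hcong : ∀ i : Nat, i < l.length → (l ++ [x]).getD i d = l.getD i d :=
      fun i hi => List.getD_append _ _ _ _ hi
    have hx : (l ++ [x]).getD l.length d = x := by
      rw [List.getD_eq_getElem?_getD]; simp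
    rw [List.length_append, List.length_singleton, List.range_succ, List.filter_append,
      List.map_append, List.filter_append]
    have hfl : List.filter (fun i => p ((l ++ [x]).getD i d)) (List.range l.length)
        = List.filter (fun i => p (l.getD i d)) (List.range l.length) :=
      List.filter_congr (fun i hi => by rw [hcong i (List.mem_range.mp hi)])
    congr 1
    · rw [hfl, ← ih]
      apply List.map_congr_left
      intro i hi
      simp only [List.mem_filter, List.mem_range] at hi
      exact hcong i hi.1
    · simp only [List.filter, hx]
      cases hpx : p x <;> simp

-- A's sumvec agrees with B's per-subset sum test
theorem pvCond_eq (sumVector : List Int) (subset : List (List Int)) :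
    pvSumvec sumVector subset =
      decide ((List.range (PySem.List.pyGetD subset (0 : Int) []).length).map (fun (j : Nat) =>
        subset.foldl (fun acc vec => acc + PySem.List.pyGetD vec ((j : Int)) 0) 0) = sumVector) := by
  unfold pvSumvec
  have hs : ∀ j : Nat,
      ((List.range subset.length).map (fun (i : Nat) =>
        PySem.List.pyGetD (PySem.List.pyGetD subset ((i : Int)) []) ((j : Int)) 0)).sum =
      subset.foldl (fun acc vec => acc + PySem.List.pyGetD vec ((j : Int)) 0) 0 := by
    intro j
    rw [PySem.List.foldl_add]
    simp only [PySem.List.pyGetD_natCast]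
    rw [pvMapIndex_eq (fun vec => vec.getD (j : Nat) 0) subset []]
    simp
  simp only [hs]
  split_ifs with h
  · exact (decide_eq_true h).symm
  · exact (decide_eq_false h).symm

-- ===== VERDICT (by name: the statement is the Claim_ definition above) =====
theorem vector_sum_subset_spec : Claim_equal_vector_sum_subset := by
  intro sumVector vectorSet _ _
  unfold Spec_vector_sum_subset vector_sum_subset vector_sum_subset_alt
  have hps : (List.range (2 ^ vectorSet.length)).map (fun (i : Nat) =>
        ((List.range vectorSet.length).filter (fun (k : Nat) => i &&& (1 <<< k) != 0)).map
          (fun (k : Nat) => PySem.List.pyGetD vectorSet ((k : Int)) [])) =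
      vectorSet.foldl (fun subsets v => subsets ++ subsets.map (fun s => s ++ [v])) [[]] := by
    rw [← pvPowerset_eq]
    apply List.map_congr_left
    intro i _
    unfold pvSub
    simp only [pvBit_eq, PySem.List.pyGetD_natCast]
  rw [hps]
  set P := (PySem.List.remove?
      (vectorSet.foldl (fun subsets v => subsets ++ subsets.map (fun s => s ++ [v])) [[]]) []).getD []
    with hP
  have hB : P.foldl (fun result subset =>
      if (List.range (PySem.List.pyGetD subset (0 : Int) []).length).map (fun (j : Nat) =>
          subset.foldl (fun acc vec => acc + PySem.List.pyGetD vec ((j : Int)) 0) 0) = sumVector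
      then result ++ [subset] else result) [] =
      P.filter (fun subset => decide
        ((List.range (PySem.List.pyGetD subset (0 : Int) []).length).map (fun (j : Nat) =>
          subset.foldl (fun acc vec => acc + PySem.List.pyGetD vec ((j : Int)) 0) 0) = sumVector)) := by
    have := PySem.List.foldl_append_if
      (fun subset : List (List Int) => decide
        ((List.range (PySem.List.pyGetD subset (0 : Int) []).length).map (fun (j : Nat) =>
          subset.foldl (fun acc vec => acc + PySem.List.pyGetD vec ((j : Int)) 0) 0) = sumVector))
      id P []
    simpa using this
  rw [hB]
  have hA : ((List.range P.length).filter (fun (i : Nat) =>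
        pvSumvec sumVector (PySem.List.pyGetD P ((i : Int)) []))).map
      (fun (i : Nat) => PySem.List.pyGetD P ((i : Int)) []) =
      P.filter (fun subset => pvSumvec sumVector subset) := by
    simp only [PySem.List.pyGetD_natCast]
    exact pvIndexFilter_eq (fun subset => pvSumvec sumVector subset) P []
  rw [hA]
  exact List.filter_congr (fun subset _ => pvCond_eq sumVector subset)
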